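-- pv_equiv track=rewrite | github.com/AvaneeshB/Python-DSA- | BomberMan.py | solve
-- ===== SOURCE A (Python) =====
-- def solve(matrix):
--     r={}
--     c={}
--     count=0
--     for i in range(len(matrix)):
--         if 1 in matrix[i]:
--             for j in range(len(matrix[i])):
--                 if matrix[i][j]==1:
--                     if i not in r:
--                         r.update({i:1})
--                     if j not in c:
--                         c.update({j:1})
--     for i in range(len(matrix)):
--         if 0 in matrix[i]:
--             for j in range(len(matrix[i])):
--                 if matrix[i][j]==0:
--                     if (i in r) or (j in c):
--                         continue
--                     else:
--                         count+=1
--     return count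
-- ===== SOURCE B (Python) =====
-- def solve(matrix):
--     def col_has_one(j):
--         return any(j < len(row) and row[j] == 1 for row in matrix)
--     return sum(1
--                for row in matrix if 1 not in row
--                for j, v in enumerate(row) if v == 0 and not col_has_one(j))
-- ===== Notes on version B (the rewrite author's own statement) =====
-- stated objective: alternative
-- what changed: Drops A's precomputed row/column marking dictionaries entirely: B does no marking pass and instead, for each zero cell in a 1-free row, scans that cell's column directly (a per-query column scan instead of a precomputed index).
import Mathlib
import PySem

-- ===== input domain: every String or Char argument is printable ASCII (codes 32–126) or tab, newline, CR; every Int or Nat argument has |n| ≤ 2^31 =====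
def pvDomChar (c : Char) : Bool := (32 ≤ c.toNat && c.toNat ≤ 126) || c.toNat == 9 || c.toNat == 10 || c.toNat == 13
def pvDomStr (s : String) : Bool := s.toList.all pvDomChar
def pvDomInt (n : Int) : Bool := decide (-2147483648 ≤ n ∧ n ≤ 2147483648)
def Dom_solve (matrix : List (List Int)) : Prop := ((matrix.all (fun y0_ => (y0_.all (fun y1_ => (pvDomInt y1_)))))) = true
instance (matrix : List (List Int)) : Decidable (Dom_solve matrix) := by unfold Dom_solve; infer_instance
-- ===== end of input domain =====

-- B drops A's precomputed row/column marking dictionaries: no marking pass; for each zero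
-- cell in a 1-free row it scans that cell's column directly (per-query scan vs precomputed index).


-- ===== PORT A =====
def solve (matrix : List (List Int)) : Int :=
  let rc : PySem.Dict Int Int × PySem.Dict Int Int :=
    (PySem.List.pyRange 0 (matrix.length : Int) 1).foldl
      (fun rc i =>
        if (PySem.List.pyGetD matrix i []).contains 1 then
          (PySem.List.pyRange 0 ((PySem.List.pyGetD matrix i []).length : Int) 1).foldl
            (fun rc j =>
              if PySem.List.pyGetD (PySem.List.pyGetD matrix i []) j 0 == 1 then
                ((if rc.1.contains i then rc.1 else rc.1.insert i 1),
                 (if rc.2.contains j then rc.2 else rc.2.insert j 1))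
              else rc)
            rc
        else rc)
      (PySem.Dict.empty, PySem.Dict.empty)
  (PySem.List.pyRange 0 (matrix.length : Int) 1).foldl
    (fun count i =>
      if (PySem.List.pyGetD matrix i []).contains 0 then
        (PySem.List.pyRange 0 ((PySem.List.pyGetD matrix i []).length : Int) 1).foldl
          (fun count j =>
            if PySem.List.pyGetD (PySem.List.pyGetD matrix i []) j 0 == 0 then
              if rc.1.contains i || rc.2.contains j then count
              else count + 1
            else count)
          count
      else count)
    0

-- ===== PORT B =====
-- `j < len(row) and row[j] == 1`: the access is guarded, so pyGetD with a dummy default is exact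
def solve_alt (matrix : List (List Int)) : Int :=
  matrix.foldl
    (fun cnt row =>
      if !(row.contains 1) then
        (PySem.List.enumerate row 0).foldl
          (fun cnt jv =>
            if jv.2 == 0 &&
               !(matrix.any (fun r =>
                   decide (jv.1 < (r.length : Int)) && (PySem.List.pyGetD r jv.1 0 == 1))) then
              cnt + 1
            else cnt)
          cnt
      else cnt)
    0

-- ===== PRECONDITION & SPEC =====
def Spec_solve (matrix : List (List Int)) (out : Int) : Prop := out = solve_alt matrix
instance (matrix : List (List Int)) (out : Int) : Decidable (Spec_solve matrix out) := by unfold Spec_solve; infer_instance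

-- ===== CLAIM (what is proved, stated in full; the proofs are below) =====
def Claim_equal_solve : Prop := ∀ (matrix : List (List Int)), Dom_solve matrix → Spec_solve matrix (solve matrix)

-- ===== LEMMAS AND PROOFS =====

-- proof-side helpers: positions of 1s in a row, and "column j contains a 1"
def onesOf (row : List Int) (s : Int) : List Int :=
  ((PySem.List.enumerate row s).filter (fun q => q.2 == 1)).map (·.1)

def colOne (m : List (List Int)) (y : Int) : Bool :=
  m.any (fun row => (onesOf row 0).contains y)

-- per-row contribution to the count (the common reference value)
def rowG (m : List (List Int)) (row : List Int) : Int :=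
  if row.contains 1 then 0
  else (((PySem.List.enumerate row 0).countP (fun q => q.2 == 0 && !(colOne m q.1)) : Nat) : Int)

-- named forms of A's loop bodies
def condIns (d : PySem.Dict Int Int) (k : Int) : PySem.Dict Int Int :=
  if d.contains k then d else d.insert k 1

def stepA (i : Int) (rc : PySem.Dict Int Int × PySem.Dict Int Int) (q : Int × Int) :
    PySem.Dict Int Int × PySem.Dict Int Int :=
  if q.2 == 1 then (condIns rc.1 i, condIns rc.2 q.1) else rc

def outerA (rc : PySem.Dict Int Int × PySem.Dict Int Int) (p : Int × List Int) :
    PySem.Dict Int Int × PySem.Dict Int Int :=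
  if p.2.contains 1 then (PySem.List.enumerate p.2 0).foldl (stepA p.1) rc else rc

def phase1E (m : List (List Int)) : PySem.Dict Int Int × PySem.Dict Int Int :=
  (PySem.List.enumerate m 0).foldl outerA (PySem.Dict.empty, PySem.Dict.empty)

def stepC (R C : PySem.Dict Int Int) (i : Int) (cnt : Int) (q : Int × Int) : Int :=
  if q.2 == 0 then (if R.contains i || C.contains q.1 then cnt else cnt + 1) else cnt

def outerC (R C : PySem.Dict Int Int) (cnt : Int) (p : Int × List Int) : Int :=
  if p.2.contains 0 then (PySem.List.enumerate p.2 0).foldl (stepC R C p.1) cnt else cnt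

def phase2E (m : List (List Int)) (R C : PySem.Dict Int Int) : Int :=
  (PySem.List.enumerate m 0).foldl (outerC R C) 0

def outerAP (rc : PySem.Dict Int Int × PySem.Dict Int Int) (p : Int × List Int) :
    PySem.Dict Int Int × PySem.Dict Int Int :=
  if p.2.contains 1 then
    (PySem.List.pyRange 0 (p.2.length : Int) 1).foldl
      (fun rc j => stepA p.1 rc (j, PySem.List.pyGetD p.2 j 0)) rc
  else rc

def outerCP (R C : PySem.Dict Int Int) (cnt : Int) (p : Int × List Int) : Int :=
  if p.2.contains 0 then
    (PySem.List.pyRange 0 (p.2.length : Int) 1).foldl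
      (fun cnt j => stepC R C p.1 cnt (j, PySem.List.pyGetD p.2 j 0)) cnt
  else cnt

-- pyRange-over-indices fold = fold over enumerate
theorem foldl_pyRange_enum {α β : Type} (xs : List α) (d : α) (f : β → Int × α → β) (init : β) :
    (PySem.List.pyRange 0 (xs.length : Int) 1).foldl
        (fun acc i => f acc (i, PySem.List.pyGetD xs i d)) init
      = (PySem.List.enumerate xs 0).foldl f init := by
  rw [PySem.List.enumerate_eq_map_pyRange xs d, List.foldl_map, PySem.List.len_eq]

theorem onesOf_nil (s : Int) : onesOf [] s = [] := rfl

theorem onesOf_cons (x : Int) (row : List Int) (s : Int) :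
    onesOf (x :: row) s = (if x == 1 then [s] else []) ++ onesOf row (s + 1) := by
  simp only [onesOf, PySem.List.enumerate_cons, List.filter_cons]
  by_cases hx : x = 1 <;> simp [hx]

theorem onesOf_eq_nil {row : List Int} (h : (1 : Int) ∉ row) (s : Int) : onesOf row s = [] := by
  simp only [onesOf, List.map_eq_nil_iff, List.filter_eq_nil_iff]
  intro q hq
  rcases (PySem.List.mem_enumerate_iff _ _ _).1 hq with ⟨k, hk, rfl⟩
  simp only [beq_iff_eq]
  intro h1
  exact h (h1 ▸ List.getElem_mem hk)

theorem contains_condIns (d : PySem.Dict Int Int) (k x : Int) :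
    (condIns d k).contains x = (d.contains x || x == k) := by
  unfold condIns
  by_cases hk : d.contains k = true
  · by_cases hx : x = k <;> simp [hk, hx]
  · simp only [hk, Bool.false_eq_true, not_false_iff, if_neg]
    by_cases hx : x = k <;> simp [PySem.Dict.contains_insert, hx, Bool.or_comm]

-- A's inner loop: effect on membership in r and c
theorem aInner (i : Int) (row : List Int) : ∀ (s : Int) (r c : PySem.Dict Int Int),
    (∀ x, (((PySem.List.enumerate row s).foldl (stepA i) (r, c)).1.contains x)
      = (r.contains x || (x == i && row.contains 1)))
    ∧ (∀ y, (((PySem.List.enumerate row s).foldl (stepA i) (r, c)).2.contains y)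
      = (c.contains y || (onesOf row s).contains y)) := by
  induction row with
  | nil => intro s r c; constructor <;> intro z <;> simp [PySem.List.enumerate_nil, onesOf_nil]
  | cons v row ih =>
    intro s r c
    rw [PySem.List.enumerate_cons, List.foldl_cons]
    by_cases hv : v = 1
    · subst hv
      have hstep : stepA i (r, c) (s, 1) = (condIns r i, condIns c s) := by simp [stepA]
      rw [hstep]
      obtain ⟨ih1, ih2⟩ := ih (s + 1) (condIns r i) (condIns c s)
      constructor
      · intro x
        rw [ih1, contains_condIns]
        by_cases hx : x = i <;> cases hr : r.contains x <;> simp [hx]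
      · intro y
        rw [ih2, contains_condIns, onesOf_cons]
        by_cases hy : y = s <;> cases hc : c.contains y <;> simp [hy]
    · have hstep : stepA i (r, c) (s, v) = (r, c) := by simp [stepA, hv]
      rw [hstep]
      obtain ⟨ih1, ih2⟩ := ih (s + 1) r c
      constructor
      · intro x
        rw [ih1]
        simp [Ne.symm hv]
      · intro y
        rw [ih2, onesOf_cons]
        simp [hv]

-- A's first phase: r marks exactly the rows containing a 1, c the columns containing a 1
theorem aOuter (m : List (List Int)) : ∀ (s : Int) (r c : PySem.Dict Int Int),
    (∀ x, (((PySem.List.enumerate m s).foldl outerA (r, c)).1.contains x)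
      = (r.contains x || (PySem.List.enumerate m s).any (fun p => x == p.1 && p.2.contains 1)))
    ∧ (∀ y, (((PySem.List.enumerate m s).foldl outerA (r, c)).2.contains y)
      = (c.contains y || colOne m y)) := by
  induction m with
  | nil => intro s r c; constructor <;> intro z <;> simp [PySem.List.enumerate_nil, colOne]
  | cons row m ih =>
    intro s r c
    rw [PySem.List.enumerate_cons, List.foldl_cons]
    by_cases hrow : row.contains 1 = true
    · have hmem : (1 : Int) ∈ row := by simpa using hrow
      have hstep : outerA (r, c) (s, row)
          = (PySem.List.enumerate row 0).foldl (stepA s) (r, c) := by simp [outerA, hmem]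
      rw [hstep]
      obtain ⟨hi1, hi2⟩ := aInner s row 0 r c
      have hpair : (PySem.List.enumerate row 0).foldl (stepA s) (r, c)
          = (((PySem.List.enumerate row 0).foldl (stepA s) (r, c)).1,
             ((PySem.List.enumerate row 0).foldl (stepA s) (r, c)).2) := rfl
      rw [hpair]
      obtain ⟨ih1, ih2⟩ := ih (s + 1) _ _
      constructor
      · intro x
        rw [ih1, hi1]
        simp only [List.any_cons, Bool.or_assoc]
      · intro y
        rw [ih2, hi2]
        simp [colOne, List.any_cons, Bool.or_assoc]
    · have hno : (1 : Int) ∉ row := by simpa using hrow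
      have hstep : outerA (r, c) (s, row) = (r, c) := by simp [outerA, hno]
      rw [hstep]
      obtain ⟨ih1, ih2⟩ := ih (s + 1) r c
      constructor
      · intro x
        rw [ih1]
        simp [List.any_cons, hno]
      · intro y
        rw [ih2]
        simp [colOne, List.any_cons, onesOf_eq_nil hno]

theorem phase1E_fst (m : List (List Int)) (x : Int) :
    (phase1E m).1.contains x
      = (PySem.List.enumerate m 0).any (fun p => x == p.1 && p.2.contains 1) := by
  have h := (aOuter m 0 PySem.Dict.empty PySem.Dict.empty).1 x
  simpa [phase1E] using h

theorem phase1E_snd (m : List (List Int)) (y : Int) :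
    (phase1E m).2.contains y = colOne m y := by
  have h := (aOuter m 0 PySem.Dict.empty PySem.Dict.empty).2 y
  simpa [phase1E] using h

theorem fst_ge_of_mem_enumerate {α : Type} {p : Int × α} {xs : List α} {s : Int}
    (h : p ∈ PySem.List.enumerate xs s) : s ≤ p.1 := by
  rcases (PySem.List.mem_enumerate_iff _ _ _).1 h with ⟨k, hk, rfl⟩
  omega

theorem any_enum_eq (q : List Int → Bool) : ∀ (m : List (List Int)) (s i : Int) (row : List Int),
    (i, row) ∈ PySem.List.enumerate m s →
    ((PySem.List.enumerate m s).any (fun p => i == p.1 && q p.2)) = q row := by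
  intro m
  induction m with
  | nil => intro s i row h; simp [PySem.List.enumerate_nil] at h
  | cons a m ih =>
    intro s i row h
    rw [PySem.List.enumerate_cons] at h ⊢
    simp only [List.any_cons]
    rcases List.mem_cons.1 h with heq | hmem
    · have hi : i = s := congrArg Prod.fst heq
      have hrow : row = a := congrArg Prod.snd heq
      subst hi; subst hrow
      cases hq : q row
      · have : ∀ p ∈ PySem.List.enumerate m (i + 1), ¬(i == p.1 && q p.2) = true := by
          intro p hp
          have := fst_ge_of_mem_enumerate hp
          have : (i == p.1) = false := by simp; omega
          simp [this]
        simp only [Bool.and_false, Bool.false_or]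
        exact List.any_eq_false.2 this
      · simp
    · have hgt : s + 1 ≤ i := fst_ge_of_mem_enumerate (p := (i, row)) hmem
      have hne : (i == s) = false := by simp; omega
      rw [ih (s + 1) i row hmem]
      simp [hne]

-- A's second phase computes the reference sum
theorem phase2E_val (m : List (List Int)) (R C : PySem.Dict Int Int)
    (hR : ∀ x, R.contains x = (PySem.List.enumerate m 0).any (fun p => x == p.1 && p.2.contains 1))
    (hC : ∀ y, C.contains y = colOne m y) :
    phase2E m R C = ((PySem.List.enumerate m 0).map (fun p => rowG m p.2)).sum := by
  unfold phase2E
  have hbody : ∀ (acc : Int), ∀ p ∈ PySem.List.enumerate m 0,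
      outerC R C acc p = acc + rowG m p.2 := by
    intro acc p hp
    have hRp : R.contains p.1 = p.2.contains 1 := by
      rw [hR p.1, any_enum_eq (fun row => row.contains 1) m 0 p.1 p.2 hp]
    unfold outerC
    by_cases h0 : p.2.contains 0 = true
    · simp only [h0, if_true]
      have hinner : ∀ (acc' : Int), ∀ q ∈ PySem.List.enumerate p.2 0,
          stepC R C p.1 acc' q
            = if q.2 == 0 && !(p.2.contains 1 || colOne m q.1) then acc' + 1 else acc' := by
        intro acc' q _
        unfold stepC
        rw [hRp, hC]
        by_cases h1m : (1 : Int) ∈ p.2 <;> by_cases hcol : colOne m q.1 = true <;>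
          by_cases hz : q.2 = 0 <;> simp [h1m, hcol, hz]
      rw [PySem.List.foldl_congr_mem _ _ _ _ hinner, PySem.List.foldl_if_add_one]
      unfold rowG
      by_cases h1m : (1 : Int) ∈ p.2 <;> simp [h1m]
    · simp only [h0]
      have hzero : rowG m p.2 = 0 := by
        unfold rowG
        by_cases h1m : (1 : Int) ∈ p.2
        · simp [h1m]
        · have hc0 : ((PySem.List.enumerate p.2 0).countP
              (fun q => q.2 == 0 && !(colOne m q.1))) = 0 := by
            apply List.countP_eq_zero.2
            intro q hq
            rcases (PySem.List.mem_enumerate_iff _ _ _).1 hq with ⟨k, hk, rfl⟩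
            have hnot : (0 : Int) ∉ p.2 := by simpa using h0
            have : p.2[k] ≠ 0 := fun hh => hnot (hh ▸ List.getElem_mem hk)
            simp [this]
          rw [if_neg (by simpa using h1m), hc0]
          rfl
      simp [hzero]
  rw [PySem.List.foldl_congr_mem _ _ _ _ hbody, PySem.List.foldl_add]
  simp

-- solve, with its pyRange loops rewritten as enumerate loops
theorem solve_eq_E (m : List (List Int)) :
    solve m = phase2E m (phase1E m).1 (phase1E m).2 := by
  have h1 : (PySem.List.pyRange 0 (m.length : Int) 1).foldl
      (fun rc i => outerAP rc (i, PySem.List.pyGetD m i [])) (PySem.Dict.empty, PySem.Dict.empty)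
      = phase1E m := by
    rw [foldl_pyRange_enum m [] (outerAP)]
    unfold phase1E
    refine PySem.List.foldl_congr_mem _ _ _ _ ?_
    intro acc p _
    unfold outerAP outerA
    by_cases hc : p.2.contains 1 = true
    · rw [if_pos hc, if_pos hc]
      exact foldl_pyRange_enum p.2 0 (stepA p.1) acc
    · rw [if_neg hc, if_neg hc]
  have h2 : ∀ R C : PySem.Dict Int Int,
      (PySem.List.pyRange 0 (m.length : Int) 1).foldl
        (fun cnt i => outerCP R C cnt (i, PySem.List.pyGetD m i [])) 0
      = phase2E m R C := by
    intro R C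
    rw [foldl_pyRange_enum m [] (outerCP R C)]
    unfold phase2E
    refine PySem.List.foldl_congr_mem _ _ _ _ ?_
    intro acc p _
    unfold outerCP outerC
    by_cases hc : p.2.contains 0 = true
    · rw [if_pos hc, if_pos hc]
      exact foldl_pyRange_enum p.2 0 (stepC R C p.1) acc
    · rw [if_neg hc, if_neg hc]
  calc solve m
      = (PySem.List.pyRange 0 (m.length : Int) 1).foldl
          (fun cnt i => outerCP
            ((PySem.List.pyRange 0 (m.length : Int) 1).foldl
              (fun rc i => outerAP rc (i, PySem.List.pyGetD m i []))
              (PySem.Dict.empty, PySem.Dict.empty)).1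
            ((PySem.List.pyRange 0 (m.length : Int) 1).foldl
              (fun rc i => outerAP rc (i, PySem.List.pyGetD m i []))
              (PySem.Dict.empty, PySem.Dict.empty)).2
            cnt (i, PySem.List.pyGetD m i [])) 0 := rfl
    _ = phase2E m (phase1E m).1 (phase1E m).2 := by rw [h1]; exact h2 _ _

-- ===== B side =====

-- B's per-cell column test agrees with colOne on nonnegative indices
theorem onesOf_contains_natCast (r : List Int) (k : Nat) :
    (onesOf r 0).contains (k : Int)
      = (decide ((k : Int) < (r.length : Int)) && (PySem.List.pyGetD r (k : Int) 0 == 1)) := by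
  rw [Bool.eq_iff_iff]
  simp only [onesOf, List.contains_eq_mem, List.mem_map, List.mem_filter,
    Bool.and_eq_true, decide_eq_true_eq, beq_iff_eq]
  constructor
  · rintro ⟨q, ⟨hq, hv⟩, hfst⟩
    rcases (PySem.List.mem_enumerate_iff _ _ _).1 hq with ⟨k', hk', rfl⟩
    have hkk : k' = k := by simp at hfst; omega
    subst hkk
    have hv' : r[k'] = 1 := by simpa using hv
    refine ⟨by exact_mod_cast hk', ?_⟩
    rw [PySem.List.pyGetD_natCast]
    simp [List.getD, hk', hv']
  · rintro ⟨hlt, hone⟩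
    have hk : k < r.length := by exact_mod_cast hlt
    rw [PySem.List.pyGetD_natCast] at hone
    refine ⟨((k : Int), r[k]), ⟨?_, ?_⟩, rfl⟩
    · exact (PySem.List.mem_enumerate_iff _ _ _).2 ⟨k, hk, by simp⟩
    · simpa [List.getD, hk] using hone
theorem colTest_eq_colOne (m : List (List Int)) (k : Nat) :
    (m.any (fun r => decide ((k : Int) < (r.length : Int)) && (PySem.List.pyGetD r (k : Int) 0 == 1)))
      = colOne m (k : Int) := by
  unfold colOne
  simp only [onesOf_contains_natCast]

-- B computes the reference sum
theorem solve_alt_eq (m : List (List Int)) :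
    solve_alt m = (m.map (fun row => rowG m row)).sum := by
  unfold solve_alt
  have hbody : ∀ (acc : Int), ∀ row ∈ m,
      (if !(row.contains 1) then
        (PySem.List.enumerate row 0).foldl
          (fun cnt jv =>
            if jv.2 == 0 &&
               !(m.any (fun r =>
                   decide (jv.1 < (r.length : Int)) && (PySem.List.pyGetD r jv.1 0 == 1))) then
              cnt + 1
            else cnt)
          acc
      else acc) = acc + rowG m row := by
    intro acc row _
    by_cases h1 : row.contains 1 = true
    · simp [rowG, (by simpa using h1 : (1:Int) ∈ row)]
    · simp only [h1, Bool.not_false, if_true]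
      have hinner : ∀ (acc' : Int), ∀ q ∈ PySem.List.enumerate row 0,
          (if q.2 == 0 &&
               !(m.any (fun r =>
                   decide (q.1 < (r.length : Int)) && (PySem.List.pyGetD r q.1 0 == 1))) then
            acc' + 1
          else acc')
            = if q.2 == 0 && !(colOne m q.1) then acc' + 1 else acc' := by
        intro acc' q hq
        rcases (PySem.List.mem_enumerate_iff _ _ _).1 hq with ⟨k, hk, rfl⟩
        simp only
        rw [show ((0 : Int) + (k : Int)) = (k : Int) by omega, colTest_eq_colOne]
      rw [PySem.List.foldl_congr_mem _ _ _ _ hinner, PySem.List.foldl_if_add_one]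
      unfold rowG
      rw [if_neg (by simpa using h1)]
  rw [PySem.List.foldl_congr_mem _ _ _ _ hbody, PySem.List.foldl_add]
  simp

-- put it together
theorem solve_eq_sum (m : List (List Int)) :
    solve m = (m.map (fun row => rowG m row)).sum := by
  rw [solve_eq_E, phase2E_val m _ _ (phase1E_fst m) (phase1E_snd m)]
  calc ((PySem.List.enumerate m 0).map (fun p => rowG m p.2)).sum
      = (((PySem.List.enumerate m 0).map (·.2)).map (rowG m)).sum := by
        rw [List.map_map]
        rfl
    _ = (m.map (fun row => rowG m row)).sum := by
        rw [PySem.List.map_snd_enumerate]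

-- ===== VERDICT (by name: the statement is the Claim_ definition above) =====
theorem solve_spec : Claim_equal_solve := by
  intro m _
  unfold Spec_solve
  rw [solve_eq_sum, solve_alt_eq]
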